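-- pv_equiv track=rewrite | github.com/jeonghoonmo/result_001 | result_explan.py | get_text_after_mimetype
-- ===== SOURCE A (Python) =====
-- def get_text_after_mimetype(data):
--     found_mimetype = False
--     result = {}
--
--     for key, value in data.items():
--         if found_mimetype:
--             result[key] = value
--         if key == "mimetype":
--             found_mimetype = True
--
--     return result
-- ===== SOURCE B (Python) =====
-- def get_text_after_mimetype(data):
--     items = list(data.items())
--     idx = next((i for i, (k, _) in enumerate(items) if k == "mimetype"), None)
--     if idx is None:
--         return {}
--     return dict(items[idx + 1:])
-- ===== Notes on version B (the rewrite author's own statement) =====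
-- stated objective: idiomatic
-- what changed: Replaces the flag-gated accumulation loop with a locate-then-slice decomposition: find the index of the first 'mimetype' key (next over enumerate) and return dict() of the item suffix after it, or {} if absent.
import Mathlib
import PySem

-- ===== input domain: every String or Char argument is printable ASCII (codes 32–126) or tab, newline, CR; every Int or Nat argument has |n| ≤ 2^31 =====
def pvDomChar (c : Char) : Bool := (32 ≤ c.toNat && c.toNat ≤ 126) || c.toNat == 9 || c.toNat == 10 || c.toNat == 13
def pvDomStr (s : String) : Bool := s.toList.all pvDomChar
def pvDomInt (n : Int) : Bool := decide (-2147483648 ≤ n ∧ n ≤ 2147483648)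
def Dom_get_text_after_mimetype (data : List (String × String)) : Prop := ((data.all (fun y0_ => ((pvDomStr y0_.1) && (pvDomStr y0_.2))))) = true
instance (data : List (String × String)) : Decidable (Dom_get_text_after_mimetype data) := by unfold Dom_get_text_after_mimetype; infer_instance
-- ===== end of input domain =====

-- B replaces A's flag-gated accumulation with locate-the-'mimetype'-index-then-slice-the-tail (idiomatic decomposition, same cost).

-- ===== PORT A =====
-- the for-loop of A, state = (found_mimetype, result) carried through the list
def getTextLoopA : List (String × String) → Bool → PySem.Dict String String → PySem.Dict String String
  | [], _, result => result
  | (key, value) :: rest, found, result =>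
      let result' := if found then result.insert key value else result
      getTextLoopA rest (found || (key == "mimetype")) result'

def get_text_after_mimetype (data : List (String × String)) : List (String × String) :=
  (getTextLoopA data false PySem.Dict.empty).items

-- ===== PORT B =====
def get_text_after_mimetype_alt (data : List (String × String)) : List (String × String) :=
  match PySem.List.index? (data.map Prod.fst) "mimetype" with
  | none => []
  | some i => (PySem.Dict.ofList (PySem.List.slice data (some ((i : Int) + 1)) none)).items

-- ===== PRECONDITION & SPEC =====
def Spec_get_text_after_mimetype (data : List (String × String)) (out : List (String × String)) : Prop := out = get_text_after_mimetype_alt data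
instance (data : List (String × String)) (out : List (String × String)) : Decidable (Spec_get_text_after_mimetype data out) := by unfold Spec_get_text_after_mimetype; infer_instance

-- ===== CLAIM (what is proved, stated in full; the proofs are below) =====
def Claim_equal_get_text_after_mimetype : Prop := ∀ (data : List (String × String)), Dom_get_text_after_mimetype data → Spec_get_text_after_mimetype data (get_text_after_mimetype data)

-- ===== LEMMAS AND PROOFS =====

-- once the flag is set, the loop just inserts everything
theorem getTextLoopA_true (l : List (String × String)) (d : PySem.Dict String String) :
    getTextLoopA l true d = l.foldl (fun d kv => d.insert kv.1 kv.2) d := by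
  induction l generalizing d with
  | nil => rfl
  | cons kv rest ih => cases kv; simp [getTextLoopA, ih]

-- with the flag unset, the loop computes insert-fold over the suffix after the first "mimetype"
theorem getTextLoopA_false (l : List (String × String)) (d : PySem.Dict String String) :
    getTextLoopA l false d =
      match PySem.List.index? (l.map Prod.fst) "mimetype" with
      | none => d
      | some i => (l.drop (i + 1)).foldl (fun d kv => d.insert kv.1 kv.2) d := by
  induction l generalizing d with
  | nil => rfl
  | cons kv rest ih =>
    obtain ⟨k, v⟩ := kv
    by_cases hk : k = "mimetype"
    · subst hk
      simp only [List.map_cons, PySem.List.index?_cons_self, getTextLoopA, beq_self_eq_true,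
        Bool.or_true, Bool.false_eq_true, if_false, getTextLoopA_true]
      rfl
    · have hne : (k == "mimetype") = false := by simp [hk]
      simp only [getTextLoopA, hne, Bool.false_or, Bool.false_eq_true, if_false, List.map_cons]
      rw [ih, PySem.List.index?_cons_of_ne _ hk]
      cases PySem.List.index? (rest.map Prod.fst) "mimetype" with
      | none => rfl
      | some i => simp [List.drop]

theorem ofList_eq_foldl_insert (l : List (String × String)) :
    PySem.Dict.ofList l = l.foldl (fun d kv => d.insert kv.1 kv.2) PySem.Dict.empty := by
  rfl

-- ===== VERDICT (by name: the statement is the Claim_ definition above) =====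
theorem get_text_after_mimetype_spec : Claim_equal_get_text_after_mimetype := by
  intro data _
  unfold Spec_get_text_after_mimetype get_text_after_mimetype get_text_after_mimetype_alt
  rw [getTextLoopA_false]
  cases h : PySem.List.index? (data.map Prod.fst) "mimetype" with
  | none => rfl
  | some i =>
    have : PySem.List.slice data (some ((i : Int) + 1)) none = data.drop (i + 1) := by
      have := PySem.List.slice_from_natCast data (i + 1)
      push_cast at this
      simpa using this
    simp [this, ofList_eq_foldl_insert]
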